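-- pv_equiv track=rewrite | github.com/izodam/Algorithm | 백준/Silver/10994. 별 찍기 － 19/별 찍기 － 19.py | drawstar
-- ===== SOURCE A (Python) =====
-- def drawstar(n):
--     if n == 1:
--         return ['*']
--     last_star = drawstar(n-1)
--     nstar = 4 * n - 3
--     res = []
--
--     res.append('*'*nstar)
--     res.append('*'+ ' '*(nstar-2) + '*')
--
--     for i in range(len(last_star)):
--         res.append('* ' + last_star[i] + ' *')
--
--     res.append('*' + ' ' * (nstar - 2) + '*')
--     res.append('*' * nstar)
--     return res
-- ===== SOURCE B (Python) =====
-- def drawstar(n):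
--     # One direct pass: the line of a row depends only on its ring distance d to the
--     # top/bottom border; each line is alternating prefix + constant middle + mirrored prefix.
--     N = 4 * n - 3
--     lines = []
--     for d in range((N + 1) // 2):
--         p = ('* ' * ((d + 2) // 2))[:d]
--         mid = ('*' if d % 2 == 0 else ' ') * (N - 2 * d)
--         lines.append(p + mid + p[::-1])
--     return [lines[min(i, N - 1 - i)] for i in range(N)]
-- ===== Notes on version B (the rewrite author's own statement) =====
-- stated objective: faster
-- what changed: Replaces the O(n^3) recursion that re-pads every smaller square with a single direct pass: each row's line is built once from its ring distance to the border (alternating prefix + constant middle + mirrored prefix), O(n^2).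
-- outside the precondition, e.g. on drawstar(0): A raises RecursionError, B returns []
import Mathlib
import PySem

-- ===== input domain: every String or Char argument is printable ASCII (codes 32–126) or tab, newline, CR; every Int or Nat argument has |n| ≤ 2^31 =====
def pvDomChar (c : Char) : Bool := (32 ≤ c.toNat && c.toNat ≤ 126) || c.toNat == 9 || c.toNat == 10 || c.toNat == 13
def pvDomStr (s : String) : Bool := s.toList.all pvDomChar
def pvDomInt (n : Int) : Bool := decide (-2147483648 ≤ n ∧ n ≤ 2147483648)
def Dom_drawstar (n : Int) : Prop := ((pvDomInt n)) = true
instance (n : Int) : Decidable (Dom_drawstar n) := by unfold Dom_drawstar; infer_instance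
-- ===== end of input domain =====

-- B replaces A's O(n^3) recursion (re-padding every smaller square) with one direct
-- O(n^2) pass computing each cell from its ring distance to the border.


-- ===== PORT A =====
-- A's recursion 'drawstar(n-1)' is modeled by structural recursion on the depth n-1
-- (a Nat); strings are built as List Char and wrapped with String.mk at the end
-- (String ↔ List Char bridge; '*'*k is List.replicate, '+' is ++), step for step.
def drawstarAuxA : Nat → List (List Char)
  | 0 => [['*']]                                  -- if n == 1: return ['*']
  | k + 1 =>
    -- last_star = drawstar(n-1) is the recursive call; nstar = 4*n - 3 = 4*(k+2) - 3;
    -- res.append('*'*nstar); res.append('*'+' '*(nstar-2)+'*'); loop; two more appends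
    (List.replicate (4 * (k + 2) - 3) '*')
      :: ('*' :: (List.replicate (4 * (k + 2) - 3 - 2) ' ' ++ ['*']))
      :: ((drawstarAuxA k).map (fun s => '*' :: ' ' :: (s ++ [' ', '*']))   -- '* '+s+' *'
          ++ [('*' :: (List.replicate (4 * (k + 2) - 3 - 2) ' ' ++ ['*'])),
              (List.replicate (4 * (k + 2) - 3) '*')])

def drawstar (n : Int) : List String :=
  (drawstarAuxA (n - 1).toNat).map String.mk

-- ===== PORT B =====
-- Source B: N = 4*n-3; for each ring distance d < (N+1)//2 one line is built as
-- p + mid + p[::-1] with p = ('* '*((d+2)//2))[:d], mid = ('*' or ' ')*(N-2*d);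
-- row i reuses the line at d = min(i, N-1-i).  Strings are List Char + String.mk.
def drawstar_alt (n : Int) : List String :=
  let lines : List String :=
    (PySem.List.pyRange 0 (PySem.Int.floordiv ((4 * n - 3) + 1) 2) 1).map (fun d =>
      let p : List Char :=
        PySem.List.slice ((List.replicate (PySem.Int.floordiv (d + 2) 2).toNat ['*', ' ']).flatten)
          none (some d)                                       -- ('* ' * ((d+2)//2))[:d]
      let mid : List Char :=
        List.replicate ((4 * n - 3) - 2 * d).toNat (if PySem.Int.mod d 2 = 0 then '*' else ' ')
      String.mk (p ++ mid ++ p.reverse))                      -- p[::-1] is reverse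
  (PySem.List.pyRange 0 (4 * n - 3) 1).map (fun i =>
    PySem.List.pyGetD lines (min i ((4 * n - 3) - 1 - i)) "") -- lines[min(i, N-1-i)], always in range

-- ===== PRECONDITION & SPEC =====
-- A recurses on n-1 with base case n == 1, so it raises RecursionError for n ≤ 0;
-- Pre_ admits exactly the n where A returns.
def Pre_drawstar (n : Int) : Prop := 1 ≤ n
instance (n : Int) : Decidable (Pre_drawstar n) := by unfold Pre_drawstar; infer_instance
def pvWitness_drawstar : Int := (3)

def Spec_drawstar (n : Int) (out : List String) : Prop := out = drawstar_alt n
instance (n : Int) (out : List String) : Decidable (Spec_drawstar n out) := by unfold Spec_drawstar; infer_instance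

-- ===== CLAIM (what is proved, stated in full; the proofs are below) =====
def Claim_equal_drawstar : Prop := ∀ (n : Int), Dom_drawstar n → Pre_drawstar n → Spec_drawstar n (drawstar n)

-- ===== LEMMAS AND PROOFS =====

-- Nat model of B's lines
def pN (d : Nat) : List Char := ((List.replicate ((d + 2) / 2) ['*', ' ']).flatten).take d

def lineN (N d : Nat) : List Char :=
  pN d ++ List.replicate (N - 2 * d) (if d % 2 = 0 then '*' else ' ') ++ (pN d).reverse

def altRowN (N i : Nat) : List Char := lineN N (min i (N - 1 - i))

def altGridN (N : Nat) : List (List Char) := (List.range N).map (altRowN N)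

lemma range_split4 (m : Nat) :
    List.range (m + 4) = 0 :: 1 :: ((List.range m).map (fun t => 2 + t) ++ [m + 2, m + 3]) := by
  rw [List.range_eq_range', show m + 4 = 2 + (m + 2) by omega,
      ← List.range'_append_1 (s := 0) (m := 2) (n := m + 2),
      show (0 : Nat) + 2 = 2 from rfl,
      ← List.range'_append_1 (s := 2) (m := m) (n := 2)]
  simp [List.range'_eq_map_range, List.range', Nat.add_comm]
  omega

lemma pN_step (d : Nat) : pN (d + 2) = '*' :: ' ' :: pN d := by
  unfold pN
  rw [show (d + 2 + 2) / 2 = (d + 2) / 2 + 1 by omega, List.replicate_succ, List.flatten_cons]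
  rfl

lemma lineN_step (N d : Nat) :
    lineN (N + 4) (d + 2) = '*' :: ' ' :: (lineN N d ++ [' ', '*']) := by
  unfold lineN
  rw [pN_step, show N + 4 - 2 * (d + 2) = N - 2 * d by omega,
      show (d + 2) % 2 = d % 2 by omega]
  simp [List.append_assoc]

lemma line_zero (N : Nat) : lineN N 0 = List.replicate N '*' := by
  simp [lineN, pN]

lemma line_one (N : Nat) : lineN N 1 = '*' :: (List.replicate (N - 2) ' ' ++ ['*']) := by
  have hp : pN 1 = ['*'] := rfl
  simp [lineN, hp]

-- one wrap of the grid: size M+4 is a starred ring, a blank ring, then the size-M grid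
lemma grid_step (M : Nat) :
    altGridN (M + 4)
      = List.replicate (M + 4) '*'
        :: ('*' :: (List.replicate (M + 2) ' ' ++ ['*']))
        :: ((altGridN M).map (fun s => '*' :: ' ' :: (s ++ [' ', '*']))
            ++ [('*' :: (List.replicate (M + 2) ' ' ++ ['*'])), List.replicate (M + 4) '*']) := by
  unfold altGridN
  rw [range_split4 M]
  simp only [List.map_cons, List.map_append, List.map_map, List.map_nil]
  have hfirst : altRowN (M + 4) 0 = List.replicate (M + 4) '*' := by
    unfold altRowN
    rw [show min 0 (M + 4 - 1 - 0) = 0 by omega, line_zero]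
  have hlast : altRowN (M + 4) (M + 3) = List.replicate (M + 4) '*' := by
    unfold altRowN
    rw [show min (M + 3) (M + 4 - 1 - (M + 3)) = 0 by omega, line_zero]
  have hb1 : altRowN (M + 4) 1 = '*' :: (List.replicate (M + 2) ' ' ++ ['*']) := by
    unfold altRowN
    rw [show min 1 (M + 4 - 1 - 1) = 1 by omega, line_one,
        show M + 4 - 2 = M + 2 by omega]
  have hb2 : altRowN (M + 4) (M + 2) = '*' :: (List.replicate (M + 2) ' ' ++ ['*']) := by
    unfold altRowN
    rw [show min (M + 2) (M + 4 - 1 - (M + 2)) = 1 by omega, line_one,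
        show M + 4 - 2 = M + 2 by omega]
  have hmid : (List.range M).map (altRowN (M + 4) ∘ fun t => 2 + t)
      = (List.range M).map (fun t => '*' :: ' ' :: (altRowN M t ++ [' ', '*'])) := by
    apply List.map_congr_left
    intro t ht
    have ht' := List.mem_range.mp ht
    simp only [Function.comp]
    unfold altRowN
    rw [show min (2 + t) (M + 4 - 1 - (2 + t)) = min t (M - 1 - t) + 2 by omega,
        show min t (M - 1 - t) + 2 = min t (M - 1 - t) + 2 from rfl, lineN_step]
  rw [hfirst, hlast, hb1, hb2, hmid]
  simp [Function.comp_def]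

-- main induction: A's aux equals B's Nat grid at size 4k+1
lemma auxA_eq_gridN (k : Nat) : drawstarAuxA k = altGridN (4 * k + 1) := by
  induction k with
  | zero => decide
  | succ k ih =>
    rw [show 4 * (k + 1) + 1 = (4 * k + 1) + 4 by omega, grid_step (4 * k + 1)]
    unfold drawstarAuxA
    rw [ih, show 4 * (k + 2) - 3 = (4 * k + 1) + 4 by omega,
        show (4 * k + 1) + 4 - 2 = (4 * k + 1) + 2 by omega]

-- bridge: B's Int port equals the Nat grid (mapped through String.mk)
lemma alt_eq_gridN (n : Int) (hn : 1 ≤ n) :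
    drawstar_alt n = (altGridN (4 * n - 3).toNat).map String.mk := by
  have hN0 : (0 : Int) ≤ 4 * n - 3 := by omega
  simp only [drawstar_alt]
  rw [PySem.Int.floordiv_eq_ediv_of_pos (by norm_num),
      show (4 * n - 3 + 1) / 2 = ((((4 * n - 3).toNat + 1) / 2 : Nat) : Int) by omega,
      PySem.List.pyRange_one 0 (4 * n - 3)]
  simp only [Int.sub_zero]
  unfold altGridN
  rw [List.map_map, List.map_map]
  apply List.map_congr_left
  intro i hi
  have hi' := List.mem_range.mp hi
  simp only [Function.comp]
  have hidx : min ((0 : Int) + (i : Int)) (4 * n - 3 - 1 - (0 + i))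
      = ((min i ((4 * n - 3).toNat - 1 - i) : Nat) : Int) := by
    push_cast
    omega
  have hlt : min i ((4 * n - 3).toNat - 1 - i) < ((4 * n - 3).toNat + 1) / 2 := by omega
  rw [hidx, PySem.List.pyGetD_map_pyRange _ _ _ _ hlt]
  set d : Nat := min i ((4 * n - 3).toNat - 1 - i) with hd
  unfold altRowN
  rw [← hd]
  congr 1
  unfold lineN pN
  rw [PySem.Int.floordiv_eq_ediv_of_pos (by norm_num),
      show ((d : Int) + 2) / 2 = (((d + 2) / 2 : Nat) : Int) by omega,
      Int.toNat_natCast, PySem.List.slice_to_natCast,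
      show (4 * n - 3 - 2 * (d : Int)).toNat = (4 * n - 3).toNat - 2 * d by omega,
      PySem.Int.mod_eq_emod_of_pos (by norm_num : (0 : Int) < 2),
      show ((d : Int)) % 2 = ((d % 2 : Nat) : Int) by omega]
  by_cases h : d % 2 = 0 <;> simp [h] <;> omega

-- ===== VERDICT (by name: the statement is the Claim_ definition above) =====
theorem drawstar_spec : Claim_equal_drawstar := by
  intro n _ hpre
  have hn : 1 ≤ n := hpre
  unfold Spec_drawstar drawstar
  rw [alt_eq_gridN n hn, auxA_eq_gridN ((n - 1).toNat)]
  congr 2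
  omega
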